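-- pv_equiv track=rewrite | github.com/MrBinit/UniGraph | app/services/unigraph_research.py | _official_pdf_domains
-- ===== SOURCE A (Python) =====
-- def _split_official_domain_tiers(domains: list[str]) -> tuple[list[str], list[str]]:
--     roots = [domain for domain in domains if len(str(domain).split(".")) <= 2]
--     subdomains = [domain for domain in domains if len(str(domain).split(".")) > 2]
--     return list(dict.fromkeys(roots)), list(dict.fromkeys(subdomains))
--
-- def _official_pdf_domains(domains: list[str]) -> list[str]:
--     roots, subdomains = _split_official_domain_tiers(domains)
--     preferred = [
--         domain
--         for domain in [*subdomains, *roots]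
--         if any(term in domain for term in ("study", "studium", "tf.", "fau", "cit.", "tum"))
--     ]
--     return list(dict.fromkeys([*preferred, *subdomains, *roots]))
-- ===== SOURCE B (Python) =====
-- def _official_pdf_domains(domains: list[str]) -> list[str]:
--     terms = ("study", "studium", "tf.", "fau", "cit.", "tum")
--     return sorted(dict.fromkeys(domains),
--                   key=lambda d: (0 if any(t in d for t in terms) else 1,
--                                  0 if len(d.split(".")) > 2 else 1))
-- ===== Notes on version B (the rewrite author's own statement) =====
-- stated objective: simpler
-- what changed: B replaces A's three-pass pipeline (two tier comprehensions with per-tier dedup, a preferred-terms comprehension, then a prepend-and-rededup) by one global dedup followed by a single stable sort whose (preferred, subdomain) 0/1 tuple key yields the same preferred-subdomains-first order.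
import Mathlib
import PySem

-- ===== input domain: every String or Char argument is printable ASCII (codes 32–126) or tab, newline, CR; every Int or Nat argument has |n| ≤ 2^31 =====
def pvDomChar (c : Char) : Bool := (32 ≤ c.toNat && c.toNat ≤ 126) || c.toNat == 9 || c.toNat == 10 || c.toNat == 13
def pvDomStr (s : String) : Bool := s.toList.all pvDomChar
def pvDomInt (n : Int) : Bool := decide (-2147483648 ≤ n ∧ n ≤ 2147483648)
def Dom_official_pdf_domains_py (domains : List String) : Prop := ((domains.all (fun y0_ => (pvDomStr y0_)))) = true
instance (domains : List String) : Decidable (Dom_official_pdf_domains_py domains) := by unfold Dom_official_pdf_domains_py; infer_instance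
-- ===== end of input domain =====

-- B replaces A's two-tier dedup + preferred-prepend-and-rededup pipeline by one global dedup
-- followed by a single stable sort on a (preferred, subdomain) 0/1 key: simpler, same output.

-- ===== PORT A =====
-- the tuple of search terms shared by both programs
def pvTerms : List String := ["study", "studium", "tf.", "fau", "cit.", "tum"]

-- 'any(term in domain for term in terms)'
def pvPreferred (d : String) : Bool := pvTerms.any (fun term => PySem.Str.isIn term d)

-- 'len(d.split(".")) > 2'  (split with the nonempty separator "." is PySem.Chars.splitOn, exact)
def pvIsSub (d : String) : Bool := decide (2 < (PySem.Chars.splitOn d.toList ['.']).length)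

def split_official_domain_tiers (domains : List String) : List String × List String :=
  let roots := domains.filter (fun domain => decide ((PySem.Chars.splitOn domain.toList ['.']).length ≤ 2))
  let subdomains := domains.filter (fun domain => pvIsSub domain)
  (PySem.List.dedup roots, PySem.List.dedup subdomains)

def official_pdf_domains_py (domains : List String) : List String :=
  let tiers := split_official_domain_tiers domains
  let roots := tiers.1
  let subdomains := tiers.2
  let preferred := (subdomains ++ roots).filter (fun domain => pvPreferred domain)
  PySem.List.dedup (preferred ++ subdomains ++ roots)

-- ===== PORT B =====
def official_pdf_domains_py_alt (domains : List String) : List String :=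
  PySem.List.sorted2 (PySem.List.dedup domains)
    (fun d => if pvPreferred d then (0 : Int) else 1)
    (fun d => if pvIsSub d then (0 : Int) else 1)

-- ===== PRECONDITION & SPEC =====
def Spec_official_pdf_domains_py (domains : List String) (out : List String) : Prop := out = official_pdf_domains_py_alt domains
instance (domains : List String) (out : List String) : Decidable (Spec_official_pdf_domains_py domains out) := by unfold Spec_official_pdf_domains_py; infer_instance

-- ===== CLAIM (what is proved, stated in full; the proofs are below) =====
def Claim_equal_official_pdf_domains_py : Prop := ∀ (domains : List String), Dom_official_pdf_domains_py domains → Spec_official_pdf_domains_py domains (official_pdf_domains_py domains)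

-- ===== LEMMAS AND PROOFS =====

-- combined sort rank of B's 0/1 tuple key: 0 = preferred subdomain, 1 = preferred root,
-- 2 = other subdomain, 3 = other root
def pvRank (d : String) : Nat := (if pvPreferred d then 0 else 2) + (if pvIsSub d then 0 else 1)

-- keep-first-occurrence traversal with an abstract 'already seen' predicate;
-- characterises PySem.List.dedup (= foldl Set.add) for the proofs below
def pvKeep {α : Type} [BEq α] (seen : α → Bool) : List α → List α
  | [] => []
  | x :: xs => if seen x then pvKeep seen xs else x :: pvKeep (fun a => a == x || seen a) xs

theorem pvKeep_cons {α : Type} [BEq α] (seen : α → Bool) (x : α) (xs : List α) :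
    pvKeep seen (x :: xs)
      = if seen x then pvKeep seen xs else x :: pvKeep (fun a => a == x || seen a) xs := rfl

theorem pvKeep_ext {α : Type} [BEq α] (f g : α → Bool) (xs : List α) (h : ∀ a, f a = g a) :
    pvKeep f xs = pvKeep g xs := by
  induction xs generalizing f g with
  | nil => rfl
  | cons x xs ih =>
    unfold pvKeep
    rw [h x]
    split
    · exact ih f g h
    · exact congrArg (x :: ·) (ih _ _ (fun a => by rw [h a]))

theorem pvFoldl_add {α : Type} [BEq α] (xs : List α) :
    ∀ acc : List α, List.foldl PySem.Set.add acc xs = acc ++ pvKeep (fun a => acc.contains a) xs := by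
  induction xs with
  | nil => intro acc; simp [pvKeep]
  | cons x xs ih =>
    intro acc
    rw [List.foldl_cons]
    by_cases h : acc.contains x = true
    · rw [show PySem.Set.add acc x = acc from by simp [PySem.Set.add, h], ih acc,
        pvKeep_cons, if_pos h]
    · rw [show PySem.Set.add acc x = acc ++ [x] from by simp [PySem.Set.add, h], ih (acc ++ [x]),
        pvKeep_cons, if_neg h, List.append_assoc, List.singleton_append]
      refine congrArg (fun t => acc ++ (x :: t)) (pvKeep_ext _ _ _ (fun a => ?_))
      cases h1 : acc.contains a <;> cases h2 : a == x <;>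
        simp [List.contains_append, List.contains_cons, List.contains_nil, h1, h2]

theorem pvDedup_eq {α : Type} [BEq α] (xs : List α) :
    PySem.List.dedup xs = pvKeep (fun _ => false) xs := by
  show List.foldl PySem.Set.add [] xs = _
  rw [pvFoldl_add, List.nil_append]
  exact pvKeep_ext _ _ _ (fun a => List.contains_nil)

theorem pvKeep_filter {α : Type} [BEq α] [LawfulBEq α] (q : α → Bool) (xs : List α) :
    ∀ f g : α → Bool, (∀ a, q a = true → f a = g a) →
    (pvKeep f xs).filter q = pvKeep g (xs.filter q) := by
  induction xs with
  | nil => intro f g _; rfl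
  | cons x xs ih =>
    intro f g h
    by_cases hq : q x = true
    · by_cases hf : f x = true
      · have hg : g x = true := by rw [← h x hq]; exact hf
        rw [pvKeep_cons, if_pos hf, List.filter_cons_of_pos hq, pvKeep_cons, if_pos hg]
        exact ih f g h
      · have hg : ¬ g x = true := by rw [← h x hq]; exact hf
        rw [pvKeep_cons, if_neg hf, List.filter_cons_of_pos hq, List.filter_cons_of_pos hq,
          pvKeep_cons, if_neg hg]
        exact congrArg (x :: ·) (ih _ _ (fun a ha => by rw [h a ha]))
    · by_cases hf : f x = true
      · rw [pvKeep_cons, if_pos hf, List.filter_cons_of_neg hq]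
        exact ih f g h
      · rw [pvKeep_cons, if_neg hf, List.filter_cons_of_neg hq, List.filter_cons_of_neg hq]
        refine ih _ g (fun a ha => ?_)
        have hax : (a == x) = false := by
          cases heq : a == x
          · rfl
          · exact absurd (by rwa [eq_of_beq heq] at ha) hq
        rw [hax, Bool.false_or, h a ha]

theorem pvKeep_nodup {α : Type} [BEq α] [LawfulBEq α] (xs : List α) :
    ∀ f : α → Bool, xs.Nodup → pvKeep f xs = xs.filter (fun a => ! f a) := by
  induction xs with
  | nil => intro f _; rfl
  | cons x xs ih =>
    intro f hnd
    have hnd' := List.nodup_cons.mp hnd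
    by_cases hf : f x = true
    · unfold pvKeep
      rw [if_pos hf, List.filter_cons_of_neg (by simp [hf]), ih f hnd'.2]
    · have hfx : f x = false := Bool.eq_false_iff.mpr hf
      unfold pvKeep
      rw [if_neg hf, List.filter_cons_of_pos (by simp [hfx]), ih _ hnd'.2]
      refine congrArg (x :: ·) (List.filter_congr (fun a ha => ?_))
      have hax : (a == x) = false := by
        cases heq : a == x
        · rfl
        · exact absurd (eq_of_beq heq ▸ ha) hnd'.1
      rw [hax, Bool.false_or]

theorem pvKeep_append {α : Type} [BEq α] [LawfulBEq α] (zs : List α) :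
    ∀ (ys : List α) (f : α → Bool), ys.Nodup → (∀ a ∈ ys, f a = false) →
    pvKeep f (ys ++ zs) = ys ++ pvKeep (fun a => ys.contains a || f a) zs := by
  intro ys
  induction ys with
  | nil =>
    intro f _ _
    rw [List.nil_append, List.nil_append]
    exact pvKeep_ext _ _ _ (fun a => (Bool.false_or (f a)).symm)
  | cons y ys ih =>
    intro f hnd hfa
    have hnd' := List.nodup_cons.mp hnd
    have hy : ¬ f y = true := by rw [hfa y (by simp)]; simp
    rw [List.cons_append, pvKeep_cons, if_neg hy]
    have hys : ∀ a ∈ ys, (a == y || f a) = false := by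
      intro a ha
      have hay : (a == y) = false := by
        cases heq : a == y
        · rfl
        · exact absurd (eq_of_beq heq ▸ ha) hnd'.1
      rw [hay, Bool.false_or]
      exact hfa a (by simp [ha])
    rw [ih _ hnd'.2 hys, List.cons_append]
    refine congrArg (fun t => y :: (ys ++ t)) (pvKeep_ext _ _ _ (fun a => ?_))
    cases heq : a == y
    · rw [List.contains_cons, heq]
      cases hc : ys.contains a <;> simp [hc]
    · rw [List.contains_cons, heq]
      simp

theorem pvInsertBy_append {α : Type} (before : α → α → Bool) (x : α) (m : List α) :
    ∀ l : List α, (∀ y ∈ l, before x y = false) →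
    PySem.List.insertBy before x (l ++ m) = l ++ PySem.List.insertBy before x m := by
  intro l
  induction l with
  | nil => intro _; rfl
  | cons y l ih =>
    intro h
    have hy : before x y = false := h y (by simp)
    rw [List.cons_append,
      show PySem.List.insertBy before x (y :: (l ++ m)) = y :: PySem.List.insertBy before x (l ++ m)
        from by simp [PySem.List.insertBy, hy]]
    exact congrArg (y :: ·) (ih (fun z hz => h z (by simp [hz])))

theorem pvInsertBy_front {α : Type} (before : α → α → Bool) (x : α) (m : List α)
    (h : ∀ y ∈ m, before x y = true) : PySem.List.insertBy before x m = x :: m := by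
  cases m with
  | nil => rfl
  | cons y l => simp [PySem.List.insertBy, h y (by simp)]

theorem pvStable4 {α : Type} (rank : α → Nat) (before : α → α → Bool)
    (hb : ∀ a b, before a b = decide (rank a < rank b)) :
    ∀ xs : List α, (∀ x ∈ xs, rank x < 4) →
    xs.foldl (fun acc x => PySem.List.insertBy before x acc) [] =
      xs.filter (fun z => rank z == 0) ++ xs.filter (fun z => rank z == 1) ++
      xs.filter (fun z => rank z == 2) ++ xs.filter (fun z => rank z == 3) := by
  intro xs
  induction xs using List.reverseRecOn with
  | nil => intro _; rfl
  | append_singleton l x ih =>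
    intro h
    rw [List.foldl_append, List.foldl_cons, List.foldl_nil,
      ih (fun y hy => h y (by simp [hy]))]
    have hbf : ∀ k : Nat, ∀ y ∈ l.filter (fun z => rank z == k),
        before x y = decide (rank x < k) := by
      intro k y hy
      rw [hb, eq_of_beq (List.mem_filter.mp hy).2]
    have h4 : rank x = 0 ∨ rank x = 1 ∨ rank x = 2 ∨ rank x = 3 := by
      have := h x (by simp)
      omega
    simp only [List.filter_append]
    rcases h4 with hr | hr | hr | hr
    · conv_lhs => rw [List.append_assoc, List.append_assoc]
      rw [pvInsertBy_append before x
            (l.filter (fun z => rank z == 1) ++ (l.filter (fun z => rank z == 2) ++ l.filter (fun z => rank z == 3)))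
            (l.filter (fun z => rank z == 0))
            (fun y hy => by rw [hbf 0 y hy, hr]; rfl),
          pvInsertBy_front before x
            (l.filter (fun z => rank z == 1) ++ (l.filter (fun z => rank z == 2) ++ l.filter (fun z => rank z == 3)))
            (by
              intro y hy
              rcases List.mem_append.mp hy with hy1 | hy23
              · rw [hbf 1 y hy1, hr]; rfl
              · rcases List.mem_append.mp hy23 with hy2 | hy3
                · rw [hbf 2 y hy2, hr]; rfl
                · rw [hbf 3 y hy3, hr]; rfl)]
      simp [hr, List.append_assoc]
    · conv_lhs => rw [List.append_assoc]
      rw [pvInsertBy_append before x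
            (l.filter (fun z => rank z == 2) ++ l.filter (fun z => rank z == 3))
            (l.filter (fun z => rank z == 0) ++ l.filter (fun z => rank z == 1))
            (by
              intro y hy
              rcases List.mem_append.mp hy with hy0 | hy1
              · rw [hbf 0 y hy0, hr]; rfl
              · rw [hbf 1 y hy1, hr]; rfl),
          pvInsertBy_front before x
            (l.filter (fun z => rank z == 2) ++ l.filter (fun z => rank z == 3))
            (by
              intro y hy
              rcases List.mem_append.mp hy with hy2 | hy3
              · rw [hbf 2 y hy2, hr]; rfl
              · rw [hbf 3 y hy3, hr]; rfl)]
      simp [hr, List.append_assoc]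
    · rw [pvInsertBy_append before x
            (l.filter (fun z => rank z == 3))
            (l.filter (fun z => rank z == 0) ++ l.filter (fun z => rank z == 1) ++ l.filter (fun z => rank z == 2))
            (by
              intro y hy
              rcases List.mem_append.mp hy with hy01 | hy2
              · rcases List.mem_append.mp hy01 with hy0 | hy1
                · rw [hbf 0 y hy0, hr]; rfl
                · rw [hbf 1 y hy1, hr]; rfl
              · rw [hbf 2 y hy2, hr]; rfl),
          pvInsertBy_front before x
            (l.filter (fun z => rank z == 3))
            (fun y hy => by rw [hbf 3 y hy, hr]; rfl)]
      simp [hr, List.append_assoc]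
    · rw [PySem.List.insertBy_of_forall_not_before before x
            (l.filter (fun z => rank z == 0) ++ l.filter (fun z => rank z == 1) ++
              l.filter (fun z => rank z == 2) ++ l.filter (fun z => rank z == 3))
            (by
              intro y hy
              rcases List.mem_append.mp hy with hy012 | hy3
              · rcases List.mem_append.mp hy012 with hy01 | hy2
                · rcases List.mem_append.mp hy01 with hy0 | hy1
                  · rw [hbf 0 y hy0, hr]; rfl
                  · rw [hbf 1 y hy1, hr]; rfl
                · rw [hbf 2 y hy2, hr]; rfl
              · rw [hbf 3 y hy3, hr]; rfl)]
      simp [hr, List.append_assoc]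

-- B's stable sort groups the deduplicated list by pvRank
theorem pvB_groups (D : List String) :
    PySem.List.sorted2 D (fun d => if pvPreferred d then (0 : Int) else 1)
        (fun d => if pvIsSub d then (0 : Int) else 1)
      = D.filter (fun z => pvRank z == 0) ++ D.filter (fun z => pvRank z == 1) ++
        D.filter (fun z => pvRank z == 2) ++ D.filter (fun z => pvRank z == 3) := by
  have hfun : (fun a b : String =>
        decide ((if pvPreferred a then (0 : Int) else 1) < (if pvPreferred b then (0 : Int) else 1)) ||
          (!decide ((if pvPreferred b then (0 : Int) else 1) < (if pvPreferred a then (0 : Int) else 1)) &&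
            decide ((if pvIsSub a then (0 : Int) else 1) < (if pvIsSub b then (0 : Int) else 1))))
      = (fun a b => decide (pvRank a < pvRank b)) := by
    funext a b
    cases hpa : pvPreferred a <;> cases hpb : pvPreferred b <;>
      cases hqa : pvIsSub a <;> cases hqb : pvIsSub b <;>
        simp [pvRank, hpa, hpb, hqa, hqb]
  calc
    PySem.List.sorted2 D (fun d => if pvPreferred d then (0 : Int) else 1)
        (fun d => if pvIsSub d then (0 : Int) else 1)
      = D.foldl (fun acc x => PySem.List.insertBy
          (fun a b : String =>
            decide ((if pvPreferred a then (0 : Int) else 1) < (if pvPreferred b then (0 : Int) else 1)) ||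
              (!decide ((if pvPreferred b then (0 : Int) else 1) < (if pvPreferred a then (0 : Int) else 1)) &&
                decide ((if pvIsSub a then (0 : Int) else 1) < (if pvIsSub b then (0 : Int) else 1))))
          x acc) [] := rfl
    _ = D.foldl (fun acc x => PySem.List.insertBy
          (fun a b : String => decide (pvRank a < pvRank b)) x acc) [] := by rw [hfun]
    _ = _ := pvStable4 pvRank _ (fun a b => rfl) D
          (fun x _ => by cases hp : pvPreferred x <;> cases hq : pvIsSub x <;> simp [pvRank, hp, hq])

theorem official_pdf_domains_py_spec : Claim_equal_official_pdf_domains_py := by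
  intro domains _
  unfold Spec_official_pdf_domains_py
  simp only [official_pdf_domains_py, official_pdf_domains_py_alt, split_official_domain_tiers]
  -- A's root test is the negation of its subdomain test
  have hpred : (fun domain : String => decide ((PySem.Chars.splitOn domain.toList ['.']).length ≤ 2))
      = (fun d => ! pvIsSub d) := by
    funext d
    unfold pvIsSub
    by_cases h : 2 < (PySem.Chars.splitOn d.toList ['.']).length
    · rw [decide_eq_false (by omega), decide_eq_true h]; rfl
    · rw [decide_eq_true (by omega), decide_eq_false h]; rfl
  -- dedup commutes with filter
  have hcomm : ∀ q : String → Bool,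
      PySem.List.dedup (domains.filter q) = (PySem.List.dedup domains).filter q := by
    intro q
    rw [pvDedup_eq, pvDedup_eq,
      ← pvKeep_filter q domains (fun _ => false) (fun _ => false) (fun _ _ => rfl)]
  rw [hpred, hcomm, hcomm, pvB_groups]
  set D := PySem.List.dedup domains with hDdef
  set S := D.filter (fun domain => pvIsSub domain) with hSdef
  set R := D.filter (fun d => ! pvIsSub d) with hRdef
  have hDnd : D.Nodup := PySem.List.nodup_dedup domains
  have hS : S.Nodup := hDnd.filter _
  have hR : R.Nodup := hDnd.filter _
  have hSR : (S ++ R).Nodup := by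
    refine hS.append hR ?_
    intro a haS haR
    have h1 := (List.mem_filter.mp haS).2
    have h2 := (List.mem_filter.mp haR).2
    rw [h1] at h2
    simp at h2
  set P := (S ++ R).filter (fun domain => pvPreferred domain) with hPdef
  have hP : P.Nodup := hSR.filter _
  -- A's final dedup keeps the preferred list once, then the not-yet-listed tier elements
  have hA : PySem.List.dedup (P ++ S ++ R)
      = P ++ (S ++ R).filter (fun a => ! pvPreferred a) := by
    rw [List.append_assoc, pvDedup_eq,
      pvKeep_append (S ++ R) P (fun _ => false) hP (fun _ _ => rfl),
      pvKeep_nodup (S ++ R) _ hSR]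
    refine congrArg (P ++ ·) (List.filter_congr (fun a ha => ?_))
    have hmemP : a ∈ P ↔ pvPreferred a = true := by
      rw [hPdef, List.mem_filter]
      simp [ha]
    have hc : P.contains a = pvPreferred a := by
      rw [Bool.eq_iff_iff, List.contains_iff_mem, hmemP]
    rw [hc, Bool.or_false]
  rw [hA]
  -- identify the four groups on both sides
  have g0 : S.filter (fun domain => pvPreferred domain) = D.filter (fun z => pvRank z == 0) := by
    rw [hSdef, List.filter_filter]
    refine List.filter_congr (fun a _ => ?_)
    cases hp : pvPreferred a <;> cases hq : pvIsSub a <;> simp [pvRank, hp, hq]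
  have g1 : R.filter (fun domain => pvPreferred domain) = D.filter (fun z => pvRank z == 1) := by
    rw [hRdef, List.filter_filter]
    refine List.filter_congr (fun a _ => ?_)
    cases hp : pvPreferred a <;> cases hq : pvIsSub a <;> simp [pvRank, hp, hq]
  have g2 : S.filter (fun a => ! pvPreferred a) = D.filter (fun z => pvRank z == 2) := by
    rw [hSdef, List.filter_filter]
    refine List.filter_congr (fun a _ => ?_)
    cases hp : pvPreferred a <;> cases hq : pvIsSub a <;> simp [pvRank, hp, hq]
  have g3 : R.filter (fun a => ! pvPreferred a) = D.filter (fun z => pvRank z == 3) := by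
    rw [hRdef, List.filter_filter]
    refine List.filter_congr (fun a _ => ?_)
    cases hp : pvPreferred a <;> cases hq : pvIsSub a <;> simp [pvRank, hp, hq]
  rw [hPdef, List.filter_append, List.filter_append, g0, g1, g2, g3]
  simp [List.append_assoc]
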